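-- pv_equiv track=rewrite | github.com/sarbeshtiwari/pencil-puzzle-bench-games | verify_uniqueness.py | solve_minesweeper
-- ===== SOURCE A (Python) =====
-- def solve_minesweeper(clue_grid, num_mines, limit=2):
--     rows = len(clue_grid)
--     cols = len(clue_grid[0])
--     DIRS = [(-1,-1),(-1,0),(-1,1),(0,-1),(0,1),(1,-1),(1,0),(1,1)]
--
--     mine_cells = [(r,c) for r in range(rows) for c in range(cols) if clue_grid[r][c] == -1]
--     mine_idx = {pos: i for i, pos in enumerate(mine_cells)}
--     n_mc = len(mine_cells)
--
--     clue_nbs = []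
--     for r in range(rows):
--         for c in range(cols):
--             if clue_grid[r][c] >= 0:
--                 nbs = [mine_idx[(r+dr,c+dc)] for dr,dc in DIRS if (r+dr,c+dc) in mine_idx]
--                 clue_nbs.append((clue_grid[r][c], nbs))
--
--     is_mine = [0] * n_mc
--     solutions = []
--
--     def feasible(decided):
--         placed = sum(is_mine[:decided])
--         remaining = n_mc - decided
--         if placed > num_mines or placed + remaining < num_mines:
--             return False
--         for val, nbs in clue_nbs:
--             mc = sum(is_mine[i] for i in nbs if i < decided)
--             und = sum(1 for i in nbs if i >= decided)
--             if mc > val or mc + und < val: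
--                 return False
--         return True
--
--     def bt(idx, placed):
--         if len(solutions) >= limit:
--             return
--         if idx == n_mc:
--             if placed == num_mines:
--                 solutions.append(is_mine[:])
--             return
--         if placed < num_mines:
--             is_mine[idx] = 1
--             if feasible(idx + 1):
--                 bt(idx + 1, placed + 1)
--                 if len(solutions) >= limit:
--                     is_mine[idx] = 0
--                     return
--             is_mine[idx] = 0
--         is_mine[idx] = 0
--         if feasible(idx + 1):
--             bt(idx + 1, placed)
--
--     bt(0, 0)
--     return solutions
-- ===== SOURCE B (Python) =====
-- def solve_minesweeper(clue_grid, num_mines, limit=2):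
--     rows = len(clue_grid)
--     cols = len(clue_grid[0])
--     DIRS = [(-1,-1),(-1,0),(-1,1),(0,-1),(0,1),(1,-1),(1,0),(1,1)]
--
--     mine_cells = [(r, c) for r in range(rows) for c in range(cols) if clue_grid[r][c] == -1]
--     mine_idx = {pos: i for i, pos in enumerate(mine_cells)}
--     n = len(mine_cells)
--
--     clue_nbs = []
--     for r in range(rows):
--         for c in range(cols):
--             if clue_grid[r][c] >= 0:
--                 nbs = [mine_idx[(r+dr, c+dc)] for dr, dc in DIRS if (r+dr, c+dc) in mine_idx]
--                 clue_nbs.append((clue_grid[r][c], nbs))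
--
--     # per-clue counters [value, decided mines so far, undecided neighbours],
--     # and for every unknown cell the clues it touches: on set/unset only those
--     # counters are updated and re-checked, instead of rescanning every clue.
--     clues = [[v, 0, len(nbs)] for v, nbs in clue_nbs]
--     cell_clues = [[] for _ in range(n)]
--     for j, (_, nbs) in enumerate(clue_nbs):
--         for i in nbs:
--             cell_clues[i].append(j)
--
--     # a clue demanding more mines than it has undecided neighbours is unsatisfiable
--     if any(v > u for v, _, u in clues):
--         return []
--
--     is_mine = [0] * n
--     solutions = []
--
--     def bt(idx, placed):
--         if len(solutions) >= limit:
--             return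
--         if idx == n:
--             if placed == num_mines:
--                 solutions.append(is_mine[:])
--             return
--         for v in (1, 0):
--             if placed + v > num_mines or placed + v + (n - idx - 1) < num_mines:
--                 continue
--             is_mine[idx] = v
--             ok = True
--             for j in cell_clues[idx]:
--                 st = clues[j]
--                 st[1] += v
--                 st[2] -= 1
--             for j in cell_clues[idx]:
--                 st = clues[j]
--                 if st[1] > st[0] or st[0] > st[1] + st[2]:
--                     ok = False
--             if ok:
--                 bt(idx + 1, placed + v)
--             for j in cell_clues[idx]:
--                 st = clues[j]
--                 st[1] -= v
--                 st[2] += 1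
--             is_mine[idx] = 0
--             if len(solutions) >= limit:
--                 return
--
--     bt(0, 0)
--     return solutions
-- ===== Notes on version B (the rewrite author's own statement) =====
-- stated objective: alternative
-- what changed: The backtracker keeps per-clue (value, decided-mines, undecided-neighbour) counters plus a cell-to-clues index, updating and re-checking only the clues adjacent to the cell being set/unset (after a one-time satisfiability precheck of all clues), instead of A's rescan of every clue and every neighbour list at every search node.
-- intended difference: On grids with no unknown (-1) cell, num_mines=0 and limit>=1 whose clues are unsatisfiable (some scanned cell >= 1, which then has no unknown neighbour), A returns [[]], declaring the empty placement a solution although a clue is violated, while B returns []; B's answer is the intended one for a placement verifier. — e.g. on solve_minesweeper([[1]], 0, 2): A returns [[]], B returns []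
import Mathlib
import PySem

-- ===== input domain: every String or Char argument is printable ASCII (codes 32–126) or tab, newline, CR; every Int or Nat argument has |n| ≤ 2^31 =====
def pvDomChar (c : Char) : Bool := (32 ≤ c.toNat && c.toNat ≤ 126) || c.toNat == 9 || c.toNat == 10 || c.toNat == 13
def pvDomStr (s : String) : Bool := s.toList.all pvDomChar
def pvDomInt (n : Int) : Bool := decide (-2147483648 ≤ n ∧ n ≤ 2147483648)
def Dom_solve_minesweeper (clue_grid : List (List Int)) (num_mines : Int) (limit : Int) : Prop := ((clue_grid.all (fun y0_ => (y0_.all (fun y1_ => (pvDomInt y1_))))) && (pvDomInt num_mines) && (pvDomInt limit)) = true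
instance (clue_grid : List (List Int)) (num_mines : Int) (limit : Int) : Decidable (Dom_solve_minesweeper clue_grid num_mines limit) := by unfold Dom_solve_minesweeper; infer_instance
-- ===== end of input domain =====

-- B replaces A's full rescan of every clue at every search node by per-clue
-- mine/undecided counters updated and re-checked only for the clues touching the
-- cell being decided (objective: alternative bookkeeping in the same backtracking).
-- Both Source A and Source B compute mine_cells / mine_idx / clue_nbs by the very same
-- lines; those prologue helpers are ported once below and used by both ports.

-- ===== PORT A =====
-- clue_grid[r][c]: exact for r < len, c < row length (guaranteed by Pre_ for all
-- scanned indices); the getD default is never read on admitted inputs.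
def pvGrid (g : List (List Int)) (r c : Nat) : Int := (g.getD r []).getD c 0

def pvDirs : List (Int × Int) := [(-1,-1),(-1,0),(-1,1),(0,-1),(0,1),(1,-1),(1,0),(1,1)]

-- mine_cells = [(r,c) for r... for c... if grid[r][c] == -1]
def pvMineCells (g : List (List Int)) (rows cols : Nat) : List (Int × Int) :=
  (List.range rows).flatMap fun r =>
    (List.range cols).filterMap fun c =>
      if pvGrid g r c = -1 then some ((r : Int), (c : Int)) else none

-- mine_idx = {pos: i for i, pos in enumerate(mine_cells)}
def pvMineIdx (mc : List (Int × Int)) : PySem.Dict (Int × Int) Nat :=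
  mc.zipIdx.foldl (fun d pi => d.insert pi.1 pi.2) PySem.Dict.empty

-- clue_nbs: for each scanned cell with value >= 0, (value, [mine_idx[nb] for nb adjacent in mine_idx])
def pvClueNbs (g : List (List Int)) (rows cols : Nat) (midx : PySem.Dict (Int × Int) Nat) :
    List (Int × List Nat) :=
  (List.range rows).flatMap fun r =>
    (List.range cols).filterMap fun c =>
      if 0 ≤ pvGrid g r c then
        some (pvGrid g r c, pvDirs.filterMap fun dd => midx.get? ((r : Int) + dd.1, (c : Int) + dd.2))
      else none

-- sum(is_mine[i] for i in nbs if i < decided)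
def mcOf (a : List Int) (d : Nat) (nbs : List Nat) : Int :=
  ((nbs.filter fun i => i < d).map fun i => a.getD i 0).sum
-- sum(1 for i in nbs if i >= decided)
def undOf (d : Nat) (nbs : List Nat) : Int := ((nbs.filter fun i => d ≤ i).length : Int)

-- placed = sum(is_mine[:decided]); remaining = n_mc - decided
def feasibleA (num : Int) (n : Nat) (cn : List (Int × List Nat)) (a : List Int) (d : Nat) : Bool :=
  if (a.take d).sum > num ∨ (a.take d).sum + ((n : Int) - (d : Int)) < num then false
  else cn.all fun p => !(decide (mcOf a d p.2 > p.1) || decide (mcOf a d p.2 + undOf d p.2 < p.1))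

-- bt(idx, placed); the in-place is_mine[idx]=v / restore of Source A becomes a.set idx v
-- on the immutable list (the restore is the identity in the functional translation);
-- fuel = n - idx steps remain, n suffices at the root.
def btA (num limit : Int) (n : Nat) (cn : List (Int × List Nat)) :
    Nat → Nat → Int → List Int → List (List Int) → List (List Int)
  | fuel, idx, placed, a, sols =>
    if limit ≤ (sols.length : Int) then sols
    else if idx = n then (if placed = num then sols ++ [a] else sols)
    else match fuel with
      | 0 => sols
      | fuel' + 1 =>
        let sols1 :=
          if placed < num then
            (if feasibleA num n cn (a.set idx 1) (idx + 1) then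
              btA num limit n cn fuel' (idx + 1) (placed + 1) (a.set idx 1) sols
            else sols)
          else sols
        if limit ≤ (sols1.length : Int) then sols1
        else if feasibleA num n cn (a.set idx 0) (idx + 1) then
          btA num limit n cn fuel' (idx + 1) placed (a.set idx 0) sols1
        else sols1

def solve_minesweeper (clue_grid : List (List Int)) (num_mines : Int) (limit : Int) : List (List Int) :=
  let rows := clue_grid.length
  let cols := (clue_grid.headD []).length
  let mc := pvMineCells clue_grid rows cols
  let midx := pvMineIdx mc
  let n := mc.length
  let cn := pvClueNbs clue_grid rows cols midx
  btA num_mines limit n cn n 0 0 (List.replicate n 0) []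

-- ===== PORT B =====
-- cell_clues[i].append(j) for every clue j and every i in its neighbour list
def pvCellClues (n : Nat) (cn : List (Int × List Nat)) : List (List Nat) :=
  cn.zipIdx.foldl
    (fun cc pj => pj.1.2.foldl (fun cc i => cc.modify i (fun l => l ++ [pj.2])) cc)
    (List.replicate n [])

-- the two for-loops of Source B over cell_clues[idx]: update the touched counters, then check them
def pvApply (cc : List Nat) (v : Int) (cs : List (Int × Int × Int)) : List (Int × Int × Int) :=
  cc.foldl (fun cs j => cs.modify j (fun t => (t.1, t.2.1 + v, t.2.2 - 1))) cs

def pvAffOk (cc : List Nat) (cs : List (Int × Int × Int)) : Bool :=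
  cc.all fun j =>
    !(decide ((cs.getD j (0, 0, 0)).2.1 > (cs.getD j (0, 0, 0)).1) ||
      decide ((cs.getD j (0, 0, 0)).2.1 + (cs.getD j (0, 0, 0)).2.2 < (cs.getD j (0, 0, 0)).1))

def btB (num limit : Int) (n : Nat) (cellClues : List (List Nat)) :
    Nat → Nat → Int → List Int → List (Int × Int × Int) → List (List Int) → List (List Int)
  | fuel, idx, placed, a, cs, sols =>
    if limit ≤ (sols.length : Int) then sols
    else if idx = n then (if placed = num then sols ++ [a] else sols)
    else match fuel with
      | 0 => sols
      | fuel' + 1 =>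
        let cc := cellClues.getD idx []
        -- v = 1
        let sols1 :=
          if ¬(placed + 1 > num ∨ placed + 1 + ((n : Int) - (idx : Int) - 1) < num) then
            (if pvAffOk cc (pvApply cc 1 cs) then
              btB num limit n cellClues fuel' (idx + 1) (placed + 1) (a.set idx 1) (pvApply cc 1 cs) sols
            else sols)
          else sols
        if limit ≤ (sols1.length : Int) then sols1
        else
          -- v = 0
          if ¬(placed > num ∨ placed + ((n : Int) - (idx : Int) - 1) < num) then
            (if pvAffOk cc (pvApply cc 0 cs) then
              btB num limit n cellClues fuel' (idx + 1) placed (a.set idx 0) (pvApply cc 0 cs) sols1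
            else sols1)
          else sols1

def solve_minesweeper_alt (clue_grid : List (List Int)) (num_mines : Int) (limit : Int) : List (List Int) :=
  let rows := clue_grid.length
  let cols := (clue_grid.headD []).length
  let mc := pvMineCells clue_grid rows cols
  let midx := pvMineIdx mc
  let n := mc.length
  let cn := pvClueNbs clue_grid rows cols midx
  let clues0 : List (Int × Int × Int) := cn.map fun p => (p.1, 0, (p.2.length : Int))
  if clues0.any (fun t => t.2.2 < t.1) then []
  else btB num_mines limit n (pvCellClues n cn) n 0 0 (List.replicate n 0) clues0 []

-- ===== PRECONDITION & SPEC =====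
-- Pre_ excludes exactly the raising inputs: clue_grid[0] (IndexError on an empty
-- grid) and clue_grid[r][c] for a row shorter than row 0 (IndexError).
def Pre_solve_minesweeper (clue_grid : List (List Int)) (num_mines : Int) (limit : Int) : Prop :=
  clue_grid ≠ [] ∧ ∀ row ∈ clue_grid, (clue_grid.headD []).length ≤ row.length
instance (clue_grid : List (List Int)) (num_mines : Int) (limit : Int) : Decidable (Pre_solve_minesweeper clue_grid num_mines limit) := by unfold Pre_solve_minesweeper; infer_instance
def pvWitness_solve_minesweeper : List (List Int) × Int × Int := ([[0, -1]], 1, 2)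

-- On grids with no unknown (-1) cell, num_mines = 0 and limit ≥ 1 whose clues are
-- not all satisfiable (some scanned cell ≥ 1 with no unknown neighbour), A returns
-- [[]] — declaring the empty placement a solution although a clue is violated —
-- while B returns []; B's answer is the intended one for a placement verifier.
def D_solve_minesweeper (clue_grid : List (List Int)) (num_mines : Int) (limit : Int) : Prop :=
  (∀ r ∈ List.range clue_grid.length, ∀ c ∈ List.range (clue_grid.headD []).length,
      (clue_grid.getD r []).getD c 0 ≠ -1)
  ∧ num_mines = 0 ∧ 1 ≤ limit
  ∧ (∃ r ∈ List.range clue_grid.length, ∃ c ∈ List.range (clue_grid.headD []).length,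
      1 ≤ (clue_grid.getD r []).getD c 0)
instance (clue_grid : List (List Int)) (num_mines : Int) (limit : Int) : Decidable (D_solve_minesweeper clue_grid num_mines limit) := by unfold D_solve_minesweeper; infer_instance

def Spec_solve_minesweeper (clue_grid : List (List Int)) (num_mines : Int) (limit : Int) (out : List (List Int)) : Prop := ¬ D_solve_minesweeper clue_grid num_mines limit → out = solve_minesweeper_alt clue_grid num_mines limit
instance (clue_grid : List (List Int)) (num_mines : Int) (limit : Int) (out : List (List Int)) : Decidable (Spec_solve_minesweeper clue_grid num_mines limit out) := by unfold Spec_solve_minesweeper; infer_instance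

def pvDiffWitness_solve_minesweeper : List (List Int) × Int × Int := ([[1]], 0, 2)
def pvDiffWitnessOut_solve_minesweeper : (List (List Int)) × (List (List Int)) := ([[]], [])

-- ===== CLAIM (what is proved, stated in full; the proofs are below) =====
def Claim_unchanged_solve_minesweeper : Prop := ∀ (clue_grid : List (List Int)) (num_mines : Int) (limit : Int), Dom_solve_minesweeper clue_grid num_mines limit → Pre_solve_minesweeper clue_grid num_mines limit → Spec_solve_minesweeper clue_grid num_mines limit (solve_minesweeper clue_grid num_mines limit)
def Claim_changed_solve_minesweeper : Prop := Dom_solve_minesweeper (pvDiffWitness_solve_minesweeper.1) (pvDiffWitness_solve_minesweeper.2.1) (pvDiffWitness_solve_minesweeper.2.2) ∧ Pre_solve_minesweeper (pvDiffWitness_solve_minesweeper.1) (pvDiffWitness_solve_minesweeper.2.1) (pvDiffWitness_solve_minesweeper.2.2) ∧ D_solve_minesweeper (pvDiffWitness_solve_minesweeper.1) (pvDiffWitness_solve_minesweeper.2.1) (pvDiffWitness_solve_minesweeper.2.2) ∧ solve_minesweeper (pvDiffWitness_solve_minesweeper.1) (pvDiffWitness_solve_minesweeper.2.1) (pvDiffWitness_solve_minesweeper.2.2)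 = pvDiffWitnessOut_solve_minesweeper.1 ∧ solve_minesweeper_alt (pvDiffWitness_solve_minesweeper.1) (pvDiffWitness_solve_minesweeper.2.1) (pvDiffWitness_solve_minesweeper.2.2) = pvDiffWitnessOut_solve_minesweeper.2 ∧ pvDiffWitnessOut_solve_minesweeper.1 ≠ pvDiffWitnessOut_solve_minesweeper.2
def Claim_exact_solve_minesweeper : Prop := ∀ (clue_grid : List (List Int)) (num_mines : Int) (limit : Int), Dom_solve_minesweeper clue_grid num_mines limit → Pre_solve_minesweeper clue_grid num_mines limit → D_solve_minesweeper clue_grid num_mines limit → solve_minesweeper clue_grid num_mines limit ≠ solve_minesweeper_alt clue_grid num_mines limit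

-- ===== LEMMAS AND PROOFS =====

-- clue p is compatible with the first d decided cells of a
def clueOk (a : List Int) (d : Nat) (p : Int × List Nat) : Prop :=
  mcOf a d p.2 ≤ p.1 ∧ p.1 ≤ mcOf a d p.2 + undOf d p.2

-- B's counter list mirrors the per-clue quantities A recomputes
def CluesInv (cn : List (Int × List Nat)) (a : List Int) (d : Nat) (cs : List (Int × Int × Int)) : Prop :=
  cs.length = cn.length ∧
  ∀ j (h : j < cn.length) (h' : j < cs.length),
    cs[j] = ((cn[j]).1, mcOf a d (cn[j]).2, undOf d (cn[j]).2)

theorem mcOf_zero (a : List Int) (nbs : List Nat) : mcOf a 0 nbs = 0 := by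
  simp [mcOf]

theorem undOf_zero (nbs : List Nat) : undOf 0 nbs = (nbs.length : Int) := by
  simp [undOf]

theorem sum_take_set (a : List Int) (idx : Nat) (v : Int) (h : idx < a.length) :
    ((a.set idx v).take (idx + 1)).sum = (a.take idx).sum + v := by
  rw [List.take_add_one, List.take_set, List.set_eq_of_length_le (by simp),
    List.getElem?_set_self (by omega)]
  simp

theorem mcOf_set_succ (a : List Int) (idx : Nat) (v : Int) (nbs : List Nat)
    (h : idx < a.length) :
    mcOf (a.set idx v) (idx + 1) nbs = mcOf a idx nbs + (nbs.count idx : Int) * v := by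
  induction nbs with
  | nil => simp [mcOf]
  | cons i t ih =>
    simp only [mcOf, List.filter_cons, List.count_cons] at ih ⊢
    by_cases hi : i = idx
    · subst hi
      have h1 : (a.set i v).getD i 0 = v := by
        rw [List.getD_eq_getElem?_getD, List.getElem?_set_self (by omega)]; rfl
      rw [if_pos (by simp), if_neg (by simp), if_pos (by simp)]
      simp only [List.map_cons, List.sum_cons, h1]
      push_cast
      linarith [ih]
    · have h3 : (a.set idx v).getD i 0 = a.getD i 0 := by
        rw [List.getD_eq_getElem?_getD, List.getD_eq_getElem?_getD,
          List.getElem?_set_ne (by omega)]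
      have hc : (i == idx) = false := by simp [hi]
      simp only [hc, Bool.false_eq_true, if_false]
      by_cases hlt : i < idx
      · rw [if_pos (by simp; omega), if_pos (by simp [hlt])]
        simp only [List.map_cons, List.sum_cons, h3]
        push_cast
        linarith [ih]
      · rw [if_neg (by simp; omega), if_neg (by simp [hlt])]
        push_cast
        linarith [ih]

theorem undOf_succ (idx : Nat) (nbs : List Nat) :
    undOf (idx + 1) nbs = undOf idx nbs - (nbs.count idx : Int) := by
  induction nbs with
  | nil => simp [undOf]
  | cons i t ih =>
    simp only [undOf, List.filter_cons, List.count_cons] at ih ⊢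
    by_cases hi : i = idx
    · subst hi
      rw [if_neg (by simp), if_pos (by simp), if_pos (by simp)]
      simp only [List.length_cons]
      push_cast
      linarith [ih]
    · have hc : (i == idx) = false := by simp [hi]
      simp only [hc, Bool.false_eq_true, if_false]
      by_cases hle : idx ≤ i
      · rw [if_pos (by simp; omega), if_pos (by simp [hle])]
        simp only [List.length_cons]
        push_cast
        linarith [ih]
      · rw [if_neg (by simp; omega), if_neg (by simp [hle])]
        push_cast
        linarith [ih]

theorem mcOf_add_undOf_le (a : List Int) (d : Nat) (nbs : List Nat)
    (h01 : ∀ i (hi : i < a.length), a[i] = 0 ∨ a[i] = 1) :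
    mcOf a d nbs + undOf d nbs ≤ (nbs.length : Int) := by
  induction nbs with
  | nil => simp [mcOf, undOf]
  | cons i t ih =>
    have hgd : a.getD i 0 ≤ 1 := by
      by_cases hi : i < a.length
      · rw [List.getD_eq_getElem a 0 hi]
        rcases h01 i hi with h | h <;> omega
      · rw [List.getD_eq_getElem?_getD, List.getElem?_eq_none (by omega)]; norm_num
    simp only [mcOf, undOf, List.filter_cons, List.length_cons] at ih ⊢
    by_cases hlt : i < d
    · rw [if_pos (by simp [hlt]), if_neg (by simp; omega)]
      simp only [List.map_cons, List.sum_cons]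
      push_cast at *
      linarith [ih]
    · rw [if_neg (by simp [hlt]), if_pos (by simp; omega)]
      simp only [List.length_cons]
      push_cast at *
      linarith [ih]

theorem length_pvApply (cc : List Nat) (v : Int) (cs : List (Int × Int × Int)) :
    (pvApply cc v cs).length = cs.length := by
  induction cc generalizing cs with
  | nil => rfl
  | cons c cc ih => simp only [pvApply, List.foldl_cons] at ih ⊢; rw [ih, List.length_modify]

theorem getElem_pvApply (cc : List Nat) (v : Int) (cs : List (Int × Int × Int))
    (j : Nat) (h : j < cs.length) (h' : j < (pvApply cc v cs).length) :
    (pvApply cc v cs)[j] =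
      ((cs[j]).1, (cs[j]).2.1 + (cc.count j : Int) * v, (cs[j]).2.2 - (cc.count j : Int)) := by
  induction cc generalizing cs with
  | nil => simp [pvApply]
  | cons c cc ih =>
    simp only [pvApply, List.foldl_cons] at ih h' ⊢
    have hm : j < (cs.modify c fun t => (t.1, t.2.1 + v, t.2.2 - 1)).length := by
      rwa [List.length_modify]
    have hl := length_pvApply cc v (cs.modify c fun t => (t.1, t.2.1 + v, t.2.2 - 1))
    simp only [pvApply] at hl
    rw [ih _ hm (by rw [hl]; exact hm)]
    rw [List.getElem_modify]
    by_cases hc : c = j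
    · subst hc
      have hb : (c == c) = true := by simp
      simp only [if_pos rfl, List.count_cons, hb, if_pos rfl]
      push_cast
      ring_nf
    · have hb : (c == j) = false := by simp [hc]
      simp only [if_neg hc, List.count_cons, hb, Bool.false_eq_true, if_false, Nat.add_zero]

theorem innerFold_length (nbs : List Nat) (j : Nat) (cc : List (List Nat)) :
    (nbs.foldl (fun cc i => cc.modify i (fun l => l ++ [j])) cc).length = cc.length := by
  induction nbs generalizing cc with
  | nil => rfl
  | cons i t ih => simp only [List.foldl_cons]; rw [ih, List.length_modify]

theorem innerFold_get (nbs : List Nat) (j : Nat) (cc : List (List Nat)) (i : Nat)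
    (h : i < cc.length) (h' : i < (nbs.foldl (fun cc i => cc.modify i (fun l => l ++ [j])) cc).length) :
    (nbs.foldl (fun cc i => cc.modify i (fun l => l ++ [j])) cc)[i]
      = cc[i] ++ List.replicate (nbs.count i) j := by
  induction nbs generalizing cc with
  | nil => simp
  | cons c t ih =>
    simp only [List.foldl_cons] at h' ⊢
    have hm : i < (cc.modify c fun l => l ++ [j]).length := by rwa [List.length_modify]
    rw [ih _ hm (by rwa [innerFold_length, List.length_modify])]
    rw [List.getElem_modify]
    by_cases hc : c = i
    · subst hc
      rw [if_pos rfl, List.count_cons_self, List.replicate_succ]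
      simp
    · rw [if_neg hc]
      rw [List.count_cons_of_ne hc]

theorem outerFold_length (l : List (Int × List Nat)) (k : Nat) (cc : List (List Nat)) :
    ((l.zipIdx k).foldl (fun cc pj => pj.1.2.foldl (fun cc i => cc.modify i (fun l => l ++ [pj.2])) cc) cc).length = cc.length := by
  induction l generalizing k cc with
  | nil => rfl
  | cons p t ih =>
    simp only [List.zipIdx_cons, List.foldl_cons]
    rw [ih, innerFold_length]

theorem outerFold_get (l : List (Int × List Nat)) (k : Nat) (cc : List (List Nat)) (i : Nat)
    (h : i < cc.length)
    (h' : i < ((l.zipIdx k).foldl (fun cc pj => pj.1.2.foldl (fun cc i => cc.modify i (fun l => l ++ [pj.2])) cc) cc).length) :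
    ((l.zipIdx k).foldl (fun cc pj => pj.1.2.foldl (fun cc i => cc.modify i (fun l => l ++ [pj.2])) cc) cc)[i]
      = cc[i] ++ (l.zipIdx k).flatMap (fun pj => List.replicate ((pj.1.2).count i) pj.2) := by
  induction l generalizing k cc with
  | nil => simp
  | cons p t ih =>
    simp only [List.zipIdx_cons, List.foldl_cons, List.flatMap_cons] at h' ⊢
    have hm : i < (p.2.foldl (fun cc i => cc.modify i (fun l => l ++ [k])) cc).length := by
      rw [innerFold_length]; exact h
    rw [ih (k+1) _ hm (by rwa [outerFold_length, innerFold_length])]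
    rw [innerFold_get _ _ _ _ h hm]
    simp [List.append_assoc]

theorem flatCount (l : List (Int × List Nat)) (k : Nat) (i j : Nat) :
    ((l.zipIdx k).flatMap (fun pj => List.replicate ((pj.1.2).count i) pj.2)).count j
      = if h : k ≤ j ∧ j - k < l.length then ((l[j-k]'h.2).2).count i else 0 := by
  induction l generalizing k with
  | nil => simp
  | cons p t ih =>
    simp only [List.zipIdx_cons, List.flatMap_cons, List.count_append, List.count_replicate]
    rw [ih (k+1)]
    by_cases hk : j = k
    · subst hk
      rw [if_pos (by simp), dif_neg (by omega), dif_pos (by exact ⟨Nat.le_refl _, by simp⟩)]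
      simp
    · rw [if_neg (by simpa using Ne.symm hk)]
      by_cases hk2 : k + 1 ≤ j ∧ j - (k+1) < t.length
      · rw [dif_pos hk2, dif_pos (by simp only [List.length_cons] at *; omega)]
        have : j - k = (j - (k+1)) + 1 := by omega
        simp only [this, List.getElem_cons_succ, Nat.zero_add]
      · rw [dif_neg hk2, dif_neg (by simp only [List.length_cons] at *; omega)]

theorem length_pvCellClues (n : Nat) (cn : List (Int × List Nat)) :
    (pvCellClues n cn).length = n := by
  unfold pvCellClues; rw [outerFold_length, List.length_replicate]

theorem count_pvCellClues (n : Nat) (cn : List (Int × List Nat)) (i j : Nat) :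
    ((pvCellClues n cn).getD i []).count j
      = if h : i < n ∧ j < cn.length then ((cn[j]'h.2).2).count i else 0 := by
  by_cases hi : i < n
  · have hlen : i < (pvCellClues n cn).length := by rw [length_pvCellClues]; exact hi
    rw [List.getD_eq_getElem _ _ hlen]
    have hrep : i < (List.replicate n ([] : List Nat)).length := by simpa using hi
    have hget := outerFold_get cn 0 (List.replicate n []) i hrep (by rwa [outerFold_length])
    simp only [pvCellClues]
    rw [hget, List.getElem_replicate, List.nil_append, flatCount]
    by_cases hj : j < cn.length
    · rw [dif_pos ⟨Nat.zero_le _, by simpa using hj⟩, dif_pos ⟨hi, hj⟩]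
      simp
    · rw [dif_neg (by omega), dif_neg (by omega)]
  · rw [List.getD_eq_default _ _ (by rw [length_pvCellClues]; omega)]
    rw [dif_neg (by omega)]
    rfl


theorem clueOk_iff_check (val mc und : Int) :
    (!(decide (mc > val) || decide (mc + und < val))) = true ↔ (mc ≤ val ∧ val ≤ mc + und) := by
  simp

theorem feasibleA_true_allOk (num : Int) (n : Nat) (cn : List (Int × List Nat))
    (a : List Int) (d : Nat) (h : feasibleA num n cn a d = true) :
    ∀ p ∈ cn, clueOk a d p := by
  intro p hp
  unfold feasibleA at h
  split at h
  · exact absurd h (by simp)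
  · exact (clueOk_iff_check p.1 (mcOf a d p.2) (undOf d p.2)).mp (List.all_eq_true.mp h p hp)

theorem mem_cc_lt (n : Nat) (cn : List (Int × List Nat)) (i j : Nat)
    (hj : j ∈ (pvCellClues n cn).getD i []) : j < cn.length := by
  by_contra hlt
  have h0 := count_pvCellClues n cn i j
  rw [dif_neg (by omega)] at h0
  have := List.count_pos_iff.mpr hj
  omega

theorem feasA_branch (num : Int) (n : Nat) (cn : List (Int × List Nat))
    (a : List Int) (cs : List (Int × Int × Int)) (idx : Nat) (placed v : Int)
    (hidx : idx < n) (hlen : a.length = n)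
    (hpl : placed = (a.take idx).sum)
    (hInv : CluesInv cn a idx cs)
    (hOk : ∀ p ∈ cn, clueOk a idx p) :
    feasibleA num n cn (a.set idx v) (idx + 1)
      = (decide (¬(placed + v > num ∨ placed + v + ((n : Int) - (idx : Int) - 1) < num))
         && pvAffOk ((pvCellClues n cn).getD idx [])
              (pvApply ((pvCellClues n cn).getD idx []) v cs)) := by
  obtain ⟨hcsl, hcs⟩ := hInv
  have hia : idx < a.length := by omega
  have hsum : ((a.set idx v).take (idx + 1)).sum = placed + v := by
    rw [sum_take_set a idx v hia, hpl]
  have hcond : ((a.set idx v).take (idx + 1)).sum > num ∨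
        ((a.set idx v).take (idx + 1)).sum + ((n : Int) - ((idx + 1 : Nat) : Int)) < num
      ↔ (placed + v > num ∨ placed + v + ((n : Int) - (idx : Int) - 1) < num) := by
    rw [hsum]; push_cast; constructor <;> (intro h; omega)
  unfold feasibleA
  by_cases hC : placed + v > num ∨ placed + v + ((n : Int) - (idx : Int) - 1) < num
  · rw [if_pos (hcond.mpr hC)]
    simp [hC]
  · rw [if_neg (fun hh => hC (hcond.mp hh)), decide_eq_true hC, Bool.true_and]
    -- pointwise description of the updated counter list
    have hccl : (pvApply ((pvCellClues n cn).getD idx []) v cs).length = cn.length := by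
      rw [length_pvApply, hcsl]
    have hcl : ∀ j (hj : j < cn.length),
        (pvApply ((pvCellClues n cn).getD idx []) v cs)[j]'(by omega) =
          ((cn[j]).1, mcOf (a.set idx v) (idx + 1) (cn[j]).2,
            undOf (idx + 1) (cn[j]).2) := by
      intro j hj
      have hcnt : ((pvCellClues n cn).getD idx []).count j = ((cn[j]).2).count idx := by
        rw [count_pvCellClues, dif_pos ⟨hidx, hj⟩]
      rw [getElem_pvApply _ _ _ _ (by omega) (by omega), hcs j hj (by omega), hcnt,
        mcOf_set_succ a idx v _ hia, undOf_succ]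
    unfold pvAffOk
    rw [Bool.eq_iff_iff, List.all_eq_true, List.all_eq_true]
    constructor
    · intro hall j hjcc
      have hj : j < cn.length := mem_cc_lt n cn idx j hjcc
      have := hall (cn[j]) (List.getElem_mem hj)
      rw [clueOk_iff_check] at this ⊢
      rw [List.getD_eq_getElem _ _ (by omega), hcl j hj]
      exact this
    · intro hall p hp
      obtain ⟨j, hj, rfl⟩ := List.mem_iff_getElem.mp hp
      rw [clueOk_iff_check]
      by_cases hjc : j ∈ (pvCellClues n cn).getD idx []
      · have := hall j hjc
        rw [List.getD_eq_getElem _ _ (by omega), hcl j hj, clueOk_iff_check] at this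
        exact this
      · have hcnt0 : ((cn[j]).2).count idx = 0 := by
          have h0 := count_pvCellClues n cn idx j
          rw [dif_pos ⟨hidx, hj⟩] at h0
          have := List.count_eq_zero.mpr hjc
          omega
        rw [mcOf_set_succ a idx v _ hia, undOf_succ, hcnt0]
        have := hOk (cn[j]) (List.getElem_mem hj)
        simpa [clueOk] using this


theorem btA_succ (num limit : Int) (n : Nat) (cn : List (Int × List Nat))
    (fuel idx : Nat) (placed : Int) (a : List Int) (sols : List (List Int)) :
    btA num limit n cn (fuel + 1) idx placed a sols =
      (if limit ≤ (sols.length : Int) then sols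
      else if idx = n then (if placed = num then sols ++ [a] else sols)
      else
        (fun sols1 =>
          if limit ≤ (sols1.length : Int) then sols1
          else if feasibleA num n cn (a.set idx 0) (idx + 1) then
            btA num limit n cn fuel (idx + 1) placed (a.set idx 0) sols1
          else sols1)
        (if placed < num then
            (if feasibleA num n cn (a.set idx 1) (idx + 1) then
              btA num limit n cn fuel (idx + 1) (placed + 1) (a.set idx 1) sols
            else sols)
          else sols)) := rfl

theorem btA_zero (num limit : Int) (n : Nat) (cn : List (Int × List Nat))
    (idx : Nat) (placed : Int) (a : List Int) (sols : List (List Int)) :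
    btA num limit n cn 0 idx placed a sols =
      (if limit ≤ (sols.length : Int) then sols
      else if idx = n then (if placed = num then sols ++ [a] else sols)
      else sols) := rfl

theorem btB_succ (num limit : Int) (n : Nat) (cellClues : List (List Nat))
    (fuel idx : Nat) (placed : Int) (a : List Int) (cs : List (Int × Int × Int))
    (sols : List (List Int)) :
    btB num limit n cellClues (fuel + 1) idx placed a cs sols =
      (if limit ≤ (sols.length : Int) then sols
      else if idx = n then (if placed = num then sols ++ [a] else sols)
      else
        (fun sols1 =>
          if limit ≤ (sols1.length : Int) then sols1
          else
            if ¬(placed > num ∨ placed + ((n : Int) - (idx : Int) - 1) < num) then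
              (if pvAffOk (cellClues.getD idx []) (pvApply (cellClues.getD idx []) 0 cs) then
                btB num limit n cellClues fuel (idx + 1) placed (a.set idx 0)
                  (pvApply (cellClues.getD idx []) 0 cs) sols1
              else sols1)
            else sols1)
        (if ¬(placed + 1 > num ∨ placed + 1 + ((n : Int) - (idx : Int) - 1) < num) then
            (if pvAffOk (cellClues.getD idx []) (pvApply (cellClues.getD idx []) 1 cs) then
              btB num limit n cellClues fuel (idx + 1) (placed + 1) (a.set idx 1)
                (pvApply (cellClues.getD idx []) 1 cs) sols
            else sols)
          else sols)) := rfl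

theorem btB_zero (num limit : Int) (n : Nat) (cellClues : List (List Nat))
    (idx : Nat) (placed : Int) (a : List Int) (cs : List (Int × Int × Int))
    (sols : List (List Int)) :
    btB num limit n cellClues 0 idx placed a cs sols =
      (if limit ≤ (sols.length : Int) then sols
      else if idx = n then (if placed = num then sols ++ [a] else sols)
      else sols) := rfl

theorem cluesInv_step (n : Nat) (cn : List (Int × List Nat)) (a : List Int)
    (cs : List (Int × Int × Int)) (idx : Nat) (v : Int)
    (hidx : idx < n) (hlen : a.length = n) (hInv : CluesInv cn a idx cs) :
    CluesInv cn (a.set idx v) (idx + 1)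
      (pvApply ((pvCellClues n cn).getD idx []) v cs) := by
  obtain ⟨hcsl, hcs⟩ := hInv
  constructor
  · rw [length_pvApply, hcsl]
  · intro j hj hj'
    have hcnt : ((pvCellClues n cn).getD idx []).count j = ((cn[j]).2).count idx := by
      rw [count_pvCellClues, dif_pos ⟨hidx, hj⟩]
    rw [getElem_pvApply _ _ _ _ (by omega) hj', hcs j hj (by omega), hcnt,
      mcOf_set_succ a idx v _ (by omega), undOf_succ]

-- main coupling: with consistent counters and all clues currently feasible, the two
-- backtracking loops return the same solution list
theorem btA_eq_btB (num limit : Int) (n : Nat) (cn : List (Int × List Nat)) :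
    ∀ (fuel idx : Nat) (placed : Int) (a : List Int) (cs : List (Int × Int × Int))
      (sols : List (List Int)),
      idx ≤ n → n ≤ fuel + idx → a.length = n →
      (∀ i (hi : i < a.length), a[i] = 0 ∨ a[i] = 1) →
      (∀ i (hi : i < a.length), idx ≤ i → a[i] = 0) →
      placed = (a.take idx).sum →
      CluesInv cn a idx cs →
      (∀ p ∈ cn, clueOk a idx p) →
      btA num limit n cn fuel idx placed a sols
        = btB num limit n (pvCellClues n cn) fuel idx placed a cs sols := by
  intro fuel
  induction fuel with
  | zero =>
    intro idx placed a cs sols h1 h2 h3 h4 h5 h6 h7 h8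
    have hidx : idx = n := by omega
    subst hidx
    rw [btA_zero, btB_zero]
  | succ fuel ih =>
    intro idx placed a cs sols h1 h2 h3 h4 h5 h6 h7 h8
    rw [btA_succ, btB_succ]
    by_cases hlim : limit ≤ (sols.length : Int)
    · rw [if_pos hlim, if_pos hlim]
    · rw [if_neg hlim, if_neg hlim]
      by_cases hidx : idx = n
      · rw [if_pos hidx, if_pos hidx]
      · rw [if_neg hidx, if_neg hidx]
        have hlt : idx < n := by omega
        have hbr1 := feasA_branch num n cn a cs idx placed 1 hlt h3 h6 h7 h8
        have hbr0 := feasA_branch num n cn a cs idx placed 0 hlt h3 h6 h7 h8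
        simp only [add_zero] at hbr0
        have hstep : ∀ v : Int, v = 0 ∨ v = 1 → ∀ sols' : List (List Int),
            feasibleA num n cn (a.set idx v) (idx + 1) = true →
            btA num limit n cn fuel (idx + 1) (placed + v) (a.set idx v) sols'
              = btB num limit n (pvCellClues n cn) fuel (idx + 1) (placed + v) (a.set idx v)
                  (pvApply ((pvCellClues n cn).getD idx []) v cs) sols' := by
          intro v hv sols' hfeas
          refine ih (idx + 1) (placed + v) (a.set idx v) _ sols' (by omega) (by omega)
            (by simpa using h3) ?_ ?_ ?_ ?_ ?_
          · intro i hi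
            rw [List.getElem_set]
            split
            · rcases hv with h | h <;> simp [h]
            · exact h4 i (by simpa using hi)
          · intro i hi hge
            rw [List.getElem_set, if_neg (by omega)]
            exact h5 i (by simpa using hi) (by omega)
          · rw [sum_take_set a idx v (by omega), h6]
          · exact cluesInv_step n cn a cs idx v hlt h3 h7
          · exact feasibleA_true_allOk num n cn _ _ hfeas
        have hsols1 :
            (if placed < num then
              (if feasibleA num n cn (a.set idx 1) (idx + 1) then
                btA num limit n cn fuel (idx + 1) (placed + 1) (a.set idx 1) sols
              else sols)
            else sols)
            = (if ¬(placed + 1 > num ∨ placed + 1 + ((n : Int) - (idx : Int) - 1) < num) then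
              (if pvAffOk ((pvCellClues n cn).getD idx [])
                    (pvApply ((pvCellClues n cn).getD idx []) 1 cs) then
                btB num limit n (pvCellClues n cn) fuel (idx + 1) (placed + 1) (a.set idx 1)
                  (pvApply ((pvCellClues n cn).getD idx []) 1 cs) sols
              else sols)
            else sols) := by
          by_cases hg1 : placed + 1 > num ∨ placed + 1 + ((n : Int) - (idx : Int) - 1) < num
          · rw [if_neg (not_not_intro hg1)]
            by_cases hpn : placed < num
            · rw [if_pos hpn, if_neg (by rw [hbr1, decide_eq_false (not_not_intro hg1), Bool.false_and]; simp)]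
            · rw [if_neg hpn]
          · have hno := not_or.mp hg1
            rw [if_pos (by omega), if_pos hg1]
            rw [hbr1, decide_eq_true hg1, Bool.true_and]
            by_cases hX : pvAffOk ((pvCellClues n cn).getD idx [])
                (pvApply ((pvCellClues n cn).getD idx []) 1 cs) = true
            · rw [if_pos hX, if_pos hX]
              exact hstep 1 (Or.inr rfl) sols
                (by rw [hbr1, decide_eq_true hg1, Bool.true_and]; exact hX)
            · rw [if_neg hX, if_neg hX]
        have htail : ∀ sols1 : List (List Int),
            (if limit ≤ (sols1.length : Int) then sols1
            else if feasibleA num n cn (a.set idx 0) (idx + 1) then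
              btA num limit n cn fuel (idx + 1) placed (a.set idx 0) sols1
            else sols1)
            = (if limit ≤ (sols1.length : Int) then sols1
            else
              if ¬(placed > num ∨ placed + ((n : Int) - (idx : Int) - 1) < num) then
                (if pvAffOk ((pvCellClues n cn).getD idx [])
                      (pvApply ((pvCellClues n cn).getD idx []) 0 cs) then
                  btB num limit n (pvCellClues n cn) fuel (idx + 1) placed (a.set idx 0)
                    (pvApply ((pvCellClues n cn).getD idx []) 0 cs) sols1
                else sols1)
              else sols1) := by
          intro sols1
          by_cases hlim1 : limit ≤ (sols1.length : Int)
          · rw [if_pos hlim1, if_pos hlim1]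
          · rw [if_neg hlim1, if_neg hlim1]
            by_cases hg0 : placed > num ∨ placed + ((n : Int) - (idx : Int) - 1) < num
            · rw [if_neg (not_not_intro hg0), if_neg (by rw [hbr0, decide_eq_false (not_not_intro hg0), Bool.false_and]; simp)]
            · rw [if_pos hg0]
              rw [hbr0, decide_eq_true hg0, Bool.true_and]
              by_cases hX : pvAffOk ((pvCellClues n cn).getD idx [])
                  (pvApply ((pvCellClues n cn).getD idx []) 0 cs) = true
              · rw [if_pos hX, if_pos hX]
                have := hstep 0 (Or.inl rfl) sols1
                  (by rw [hbr0, decide_eq_true hg0, Bool.true_and]; exact hX)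
                simpa using this
              · rw [if_neg hX, if_neg hX]
        simp only []
        rw [hsols1]
        exact htail _


theorem feasibleA_false_of_bad (num : Int) (n : Nat) (cn : List (Int × List Nat))
    (a : List Int) (d : Nat)
    (h01 : ∀ i (hi : i < a.length), a[i] = 0 ∨ a[i] = 1)
    (p : Int × List Nat) (hp : p ∈ cn) (hbad : ((p.2).length : Int) < p.1) :
    feasibleA num n cn a d = false := by
  unfold feasibleA
  split
  · rfl
  · rw [List.all_eq_false]
    refine ⟨p, hp, ?_⟩
    rw [clueOk_iff_check]
    have := mcOf_add_undOf_le a d p.2 h01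
    omega

theorem replset_01 (n : Nat) (v : Int) (hv : v = 0 ∨ v = 1) :
    ∀ i (hi : i < ((List.replicate n (0 : Int)).set 0 v).length),
      ((List.replicate n (0 : Int)).set 0 v)[i] = 0 ∨ ((List.replicate n (0 : Int)).set 0 v)[i] = 1 := by
  intro i hi
  rw [List.getElem_set]
  split
  · exact hv
  · left
    exact List.getElem_replicate _

-- a clue wanting more mines than its neighbour count makes A return [] whenever n > 0
theorem btA_nil_of_bad (num limit : Int) (n : Nat) (cn : List (Int × List Nat))
    (hn : 0 < n) (p : Int × List Nat) (hp : p ∈ cn) (hbad : ((p.2).length : Int) < p.1) :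
    btA num limit n cn n 0 0 (List.replicate n 0) [] = [] := by
  obtain ⟨m, rfl⟩ : ∃ m, n = m + 1 := ⟨n - 1, by omega⟩
  have hf1 := feasibleA_false_of_bad num (m + 1) cn ((List.replicate (m + 1) (0 : Int)).set 0 1) 1
    (replset_01 (m + 1) 1 (Or.inr rfl)) p hp hbad
  have hf0 := feasibleA_false_of_bad num (m + 1) cn (List.replicate (m + 1) (0 : Int)) 1
    (fun i hi => Or.inl (List.getElem_replicate _)) p hp hbad
  rw [btA_succ]
  simp [hf1, hf0]


theorem mem_pvClueNbs (g : List (List Int)) (rows cols : Nat)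
    (midx : PySem.Dict (Int × Int) Nat) (p : Int × List Nat)
    (hp : p ∈ pvClueNbs g rows cols midx) :
    ∃ r ∈ List.range rows, ∃ c ∈ List.range cols, 0 ≤ pvGrid g r c ∧ p.1 = pvGrid g r c := by
  unfold pvClueNbs at hp
  rw [List.mem_flatMap] at hp
  obtain ⟨r, hr, hp⟩ := hp
  rw [List.mem_filterMap] at hp
  obtain ⟨c, hc, hfc⟩ := hp
  refine ⟨r, hr, c, hc, ?_⟩
  split at hfc
  · rename_i hge
    cases hfc
    exact ⟨hge, rfl⟩
  · cases hfc

theorem mem_pvClueNbs_of (g : List (List Int)) (rows cols : Nat)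
    (midx : PySem.Dict (Int × Int) Nat) (r c : Nat)
    (hr : r < rows) (hc : c < cols) (hv : 0 ≤ pvGrid g r c) :
    (pvGrid g r c, pvDirs.filterMap fun dd => midx.get? ((r : Int) + dd.1, (c : Int) + dd.2))
      ∈ pvClueNbs g rows cols midx := by
  unfold pvClueNbs
  rw [List.mem_flatMap]
  refine ⟨r, List.mem_range.mpr hr, ?_⟩
  rw [List.mem_filterMap]
  exact ⟨c, List.mem_range.mpr hc, by rw [if_pos hv]⟩

theorem mineCells_nil_iff (g : List (List Int)) (rows cols : Nat) :
    pvMineCells g rows cols = []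
      ↔ ∀ r ∈ List.range rows, ∀ c ∈ List.range cols, pvGrid g r c ≠ -1 := by
  unfold pvMineCells
  rw [List.flatMap_eq_nil_iff]
  constructor
  · intro h r hr c hc hne
    have := List.filterMap_eq_nil_iff.mp (h r hr) c hc
    rw [if_pos hne] at this
    cases this
  · intro h r hr
    rw [List.filterMap_eq_nil_iff]
    intro c hc
    rw [if_neg (h r hr c hc)]

theorem pvMineIdx_nil_get (k : Int × Int) : (pvMineIdx []).get? k = none := by
  simp [pvMineIdx, PySem.Dict.get?_empty]

theorem solve_eq (g : List (List Int)) (num limit : Int)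
    (hD : ¬ D_solve_minesweeper g num limit) :
    solve_minesweeper g num limit = solve_minesweeper_alt g num limit := by
  unfold solve_minesweeper solve_minesweeper_alt
  simp only []
  set rows := g.length with hrows
  set cols := (g.headD []).length with hcols
  set mc := pvMineCells g rows cols with hmc
  set midx := pvMineIdx mc with hmidx
  set cn := pvClueNbs g rows cols midx with hcn
  by_cases hbad : (cn.map fun p => (p.1, (0 : Int), ((p.2.length : Nat) : Int))).any
      (fun t => t.2.2 < t.1) = true
  · -- some clue is unsatisfiable from the start; both sides return []
    rw [if_pos hbad]
    rw [List.any_eq_true] at hbad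
    obtain ⟨t, ht, htlt⟩ := hbad
    rw [List.mem_map] at ht
    obtain ⟨p, hp, rfl⟩ := ht
    simp only [decide_eq_true_eq] at htlt
    have hbadp : ((p.2).length : Int) < p.1 := htlt
    by_cases hn : 0 < mc.length
    · exact btA_nil_of_bad num limit mc.length cn hn p hp hbadp
    · -- no unknown cells at all: A returns [[]] only when num = 0 and limit ≥ 1,
      -- which ¬D_ rules out here
      have hn0 : mc.length = 0 := by omega
      rw [hn0]
      rw [btA_zero]
      have hnil : mc = [] := List.length_eq_zero_iff.mp hn0
      have hval : 1 ≤ p.1 := by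
        have : (0 : Int) ≤ (p.2.length : Int) := by positivity
        omega
      obtain ⟨r, hr, c, hc, hge, hpeq⟩ := mem_pvClueNbs g rows cols midx p hp
      have hD1 : ∀ r ∈ List.range g.length, ∀ c ∈ List.range (g.headD []).length,
          (g.getD r []).getD c 0 ≠ -1 := by
        intro r' hr' c' hc' hne
        exact (mineCells_nil_iff g rows cols).mp hnil r' hr' c' hc'
          (by simpa [pvGrid] using hne)
      have hD4 : ∃ r ∈ List.range g.length, ∃ c ∈ List.range (g.headD []).length,
          1 ≤ (g.getD r []).getD c 0 :=
        ⟨r, hr, c, hc, by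
          rw [show (g.getD r []).getD c 0 = pvGrid g r c from rfl, ← hpeq]; exact hval⟩
      by_cases hlim : limit ≤ (([] : List (List Int)).length : Int)
      · rw [if_pos hlim]
      · rw [if_neg hlim]
        rw [if_pos rfl]
        have hnum : ¬((0 : Int) = num) := by
          intro hne
          exact hD ⟨hD1, hne.symm, by simp at hlim; omega, hD4⟩
        rw [if_neg hnum]
  · rw [if_neg hbad]
    have hOk : ∀ p ∈ cn, clueOk (List.replicate mc.length 0) 0 p := by
      intro p hp
      constructor
      · rw [mcOf_zero]
        obtain ⟨r, hr, c, hc, hge, hpeq⟩ := mem_pvClueNbs g rows cols midx p hp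
        omega
      · rw [mcOf_zero, undOf_zero]
        rw [Bool.not_eq_true, List.any_eq_false] at hbad
        have := hbad (p.1, (0 : Int), ((p.2.length : Nat) : Int)) (List.mem_map_of_mem hp)
        simp only [decide_eq_true_eq] at this
        omega
    exact btA_eq_btB num limit mc.length cn mc.length 0 0 (List.replicate mc.length 0)
      (cn.map fun p => (p.1, (0 : Int), ((p.2.length : Nat) : Int))) []
      (by omega) (by omega) (by simp)
      (fun i hi => Or.inl (List.getElem_replicate _))
      (fun i hi _ => List.getElem_replicate _)
      (by simp)
      ⟨by simp, by
        intro j hj hj'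
        rw [List.getElem_map, mcOf_zero, undOf_zero]⟩
      hOk

-- ===== VERDICT (by name: the statement is the Claim_ definition above) =====
theorem solve_minesweeper_spec : Claim_unchanged_solve_minesweeper := by
  intro g num limit _ _ hD
  exact solve_eq g num limit hD

theorem solve_minesweeper_changed : Claim_changed_solve_minesweeper := by
  unfold Claim_changed_solve_minesweeper; decide

theorem solve_minesweeper_tight : Claim_exact_solve_minesweeper := by
  intro g num limit _ hPre hD
  obtain ⟨hD1, hnum, hlim, r, hr, c, hc, hval⟩ := hD
  have hnil : pvMineCells g g.length (g.headD []).length = [] := by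
    rw [mineCells_nil_iff]
    intro r' hr' c' hc'
    simpa [pvGrid] using hD1 r' hr' c' hc'
  have hvg : (1 : Int) ≤ pvGrid g r c := hval
  unfold solve_minesweeper solve_minesweeper_alt
  simp only []
  rw [hnil]
  simp only [List.length_nil]
  rw [btA_zero]
  have hnbs : (pvDirs.filterMap fun dd =>
      (pvMineIdx []).get? ((r : Int) + dd.1, (c : Int) + dd.2)) = [] := by
    simp [pvDirs, pvMineIdx_nil_get]
  have hmemc := mem_pvClueNbs_of g g.length (g.headD []).length (pvMineIdx []) r c
    (List.mem_range.mp hr) (List.mem_range.mp hc) (by omega)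
  rw [hnbs] at hmemc
  have hany : ((pvClueNbs g g.length (g.headD []).length (pvMineIdx [])).map
      (fun p => (p.1, (0 : Int), ((p.2.length : Nat) : Int)))).any
      (fun t => t.2.2 < t.1) = true := by
    rw [List.any_eq_true]
    exact ⟨_, List.mem_map_of_mem hmemc, by simp; omega⟩
  rw [if_pos hany]
  have hlim' : ¬ limit ≤ (([] : List (List Int)).length : Int) := by simp; omega
  rw [if_neg hlim', if_pos rfl, if_pos (by omega : (0 : Int) = num)]
  simp
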